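-- pv_equiv track=rewrite | github.com/pratheeknagaraj/advent-of-code-2020 | 25/25a.py | find_loop_num
-- ===== SOURCE A (Python) =====
-- def find_loop_num(subj_num, pub_num):
--     limit = 10000000
--     divisor = 20201227
--     for i in range(limit):
--         rem = pow(subj_num, i, divisor)
--         if rem == pub_num:
--             return i
--     return None
-- ===== SOURCE B (Python) =====
-- def find_loop_num(subj_num, pub_num):
--     limit = 10000000
--     divisor = 20201227
--     rem = 1
--     for i in range(limit):
--         if rem == pub_num:
--             return i
--         rem = rem * subj_num % divisor
--     return None
-- ===== Notes on version B (the rewrite author's own statement) =====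
-- stated objective: faster
-- what changed: B replaces the per-iteration modular exponentiation pow(subj_num, i, divisor) with a single running product rem = rem * subj_num % divisor maintained across the loop.
import Mathlib
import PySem

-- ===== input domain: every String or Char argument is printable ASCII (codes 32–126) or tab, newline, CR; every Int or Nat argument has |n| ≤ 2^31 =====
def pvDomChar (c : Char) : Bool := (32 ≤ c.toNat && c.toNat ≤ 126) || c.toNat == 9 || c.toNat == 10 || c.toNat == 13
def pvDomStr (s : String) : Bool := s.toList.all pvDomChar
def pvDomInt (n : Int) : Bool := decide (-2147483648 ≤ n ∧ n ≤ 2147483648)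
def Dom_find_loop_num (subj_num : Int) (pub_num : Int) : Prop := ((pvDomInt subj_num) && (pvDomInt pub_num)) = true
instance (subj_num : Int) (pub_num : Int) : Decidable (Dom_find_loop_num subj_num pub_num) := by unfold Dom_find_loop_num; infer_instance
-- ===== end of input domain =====

-- B replaces A's per-iteration modular exponentiation pow(subj_num, i, divisor) with a single
-- running product rem = rem * subj_num % divisor maintained across the loop (objective: faster).

-- ===== PORT A =====
-- Python's three-argument pow(b, e, m): modular exponentiation (square-and-multiply over the
-- exponent, base reduced mod m first). Exact for m > 0: result = b^e mod m in [0, m).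
-- pvPowModAux m b e acc = acc * b^e % m (for acc < m), processing e two bits at a time.
def pvPowModAux (m : Nat) : Nat → Nat → Nat → Nat
  | _, 0, acc => acc
  | b, e+1, acc =>
      let r := (e+1) % 4
      pvPowModAux m (b * b % m * (b * b % m) % m) ((e+1)/4)
        (if r = 0 then acc else if r = 1 then acc * b % m
         else if r = 2 then acc * (b * b % m) % m else acc * (b * b % m) % m * b % m)
decreasing_by omega

-- Python's % with a positive modulus equals Lean's Int.emod (written %), so this is exact here.
def pvPowMod (b : Int) (m : Int) (e : Nat) : Int :=
  ((pvPowModAux m.toNat ((b % m).toNat) e (1 % m.toNat) : Nat) : Int)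

-- the for-loop of A: i counts up, fuel = remaining iterations of range(limit)
def findA_aux (subj_num pub_num : Int) : Nat → Nat → Option Int
  | _, 0 => none
  | i, fuel+1 =>
      let rem := pvPowMod subj_num 20201227 i
      if rem = pub_num then some (i : Int) else findA_aux subj_num pub_num (i+1) fuel

def find_loop_num (subj_num : Int) (pub_num : Int) : Option Int :=
  findA_aux subj_num pub_num 0 10000000

-- ===== PORT B =====
-- the for-loop of B: carries the running remainder rem = subj^i mod divisor
def findB_aux (subj_num pub_num : Int) : Int → Nat → Nat → Option Int
  | _, _, 0 => none
  | rem, i, fuel+1 =>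
      if rem = pub_num then some (i : Int)
      else findB_aux subj_num pub_num (rem * subj_num % 20201227) (i+1) fuel

def find_loop_num_alt (subj_num : Int) (pub_num : Int) : Option Int :=
  findB_aux subj_num pub_num 1 0 10000000

-- ===== PRECONDITION & SPEC =====
def Spec_find_loop_num (subj_num : Int) (pub_num : Int) (out : Option Int) : Prop := out = find_loop_num_alt subj_num pub_num
instance (subj_num : Int) (pub_num : Int) (out : Option Int) : Decidable (Spec_find_loop_num subj_num pub_num out) := by unfold Spec_find_loop_num; infer_instance

-- ===== CLAIM (what is proved, stated in full; the proofs are below) =====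
def Claim_equal_find_loop_num : Prop := ∀ (subj_num : Int) (pub_num : Int), Dom_find_loop_num subj_num pub_num → Spec_find_loop_num subj_num pub_num (find_loop_num subj_num pub_num)

-- ===== LEMMAS AND PROOFS =====

theorem pvPowModAux_eq (m : Nat) (hm : 0 < m) :
    ∀ (e b acc : Nat), acc < m → pvPowModAux m b e acc = acc * b ^ e % m := by
  intro e
  induction e using Nat.strong_induction_on with
  | _ e ih =>
    match e with
    | 0 => intro b acc hacc; simp [pvPowModAux, Nat.mod_eq_of_lt hacc]
    | n+1 =>
      intro b acc hacc
      rw [pvPowModAux]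
      have hk : (n+1)/4 < n+1 := by omega
      have hb' : (b * b % m * (b * b % m) % m) ≡ b ^ 4 [MOD m] := by
        calc b * b % m * (b * b % m) % m
            ≡ b * b % m * (b * b % m) [MOD m] := Nat.mod_modEq _ m
          _ ≡ (b * b) * (b * b) [MOD m] := Nat.ModEq.mul (Nat.mod_modEq _ m) (Nat.mod_modEq _ m)
          _ = b ^ 4 := by ring
      have hacc' : ∀ r : Nat, r = (n+1) % 4 →
          (if r = 0 then acc else if r = 1 then acc * b % m
           else if r = 2 then acc * (b * b % m) % m else acc * (b * b % m) % m * b % m)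
            ≡ acc * b ^ r [MOD m] ∧
          (if r = 0 then acc else if r = 1 then acc * b % m
           else if r = 2 then acc * (b * b % m) % m else acc * (b * b % m) % m * b % m) < m := by
        intro r hr
        have h4 : r < 4 := by omega
        interval_cases r
        · exact ⟨by simpa using Nat.ModEq.refl acc, hacc⟩
        · exact ⟨by simpa [pow_one] using (Nat.mod_modEq (acc * b) m), Nat.mod_lt _ hm⟩
        · refine ⟨?_, Nat.mod_lt _ hm⟩
          calc acc * (b * b % m) % m
              ≡ acc * (b * b % m) [MOD m] := Nat.mod_modEq _ m
            _ ≡ acc * (b * b) [MOD m] := Nat.ModEq.mul_left acc (Nat.mod_modEq _ m)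
            _ = acc * b ^ 2 := by ring
        · refine ⟨?_, Nat.mod_lt _ hm⟩
          calc acc * (b * b % m) % m * b % m
              ≡ acc * (b * b % m) % m * b [MOD m] := Nat.mod_modEq _ m
            _ ≡ acc * (b * b % m) * b [MOD m] := Nat.ModEq.mul_right b (Nat.mod_modEq _ m)
            _ ≡ acc * (b * b) * b [MOD m] :=
                Nat.ModEq.mul_right b (Nat.ModEq.mul_left acc (Nat.mod_modEq _ m))
            _ = acc * b ^ 3 := by ring
      obtain ⟨hmod, hlt⟩ := hacc' ((n+1) % 4) rfl
      rw [ih ((n+1)/4) hk _ _ hlt]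
      have : (if (n+1) % 4 = 0 then acc else if (n+1) % 4 = 1 then acc * b % m
           else if (n+1) % 4 = 2 then acc * (b * b % m) % m
           else acc * (b * b % m) % m * b % m) * (b * b % m * (b * b % m) % m) ^ ((n+1)/4)
          ≡ acc * b ^ ((n+1) % 4) * (b ^ 4) ^ ((n+1)/4) [MOD m] :=
        Nat.ModEq.mul hmod (hb'.pow _)
      rw [this]
      congr 1
      rw [← pow_mul, mul_assoc, ← pow_add]
      congr 2
      omega

-- pvPowMod computes b^e mod m over Int (m = 20201227 here)
theorem pvPowMod_eq (b : Int) (e : Nat) : pvPowMod b 20201227 e = b ^ e % 20201227 := by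
  have hm : (0:Nat) < (20201227:Int).toNat := by decide
  unfold pvPowMod
  rw [pvPowModAux_eq _ hm e _ _ (by decide)]
  have hb : ((b % 20201227).toNat : Int) = b % 20201227 :=
    Int.toNat_of_nonneg (Int.emod_nonneg b (by decide))
  have : (((1 % (20201227:Int).toNat) * ((b % 20201227).toNat) ^ e % (20201227:Int).toNat : Nat) : Int)
      = ((b % 20201227) ^ e) % 20201227 := by
    push_cast [hb]
    norm_num
  rw [this]
  exact Int.ModEq.pow e (Int.emod_emod_of_dvd b dvd_rfl)

-- loop equivalence: B's carried remainder equals the value A recomputes each iteration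
theorem aux_eq (subj_num pub_num : Int) :
    ∀ (fuel i : Nat) (rem : Int), rem = subj_num ^ i % 20201227 →
      findB_aux subj_num pub_num rem i fuel = findA_aux subj_num pub_num i fuel := by
  intro fuel
  induction fuel with
  | zero => intro i rem _; rfl
  | succ n ih =>
    intro i rem hrem
    rw [findA_aux, findB_aux]
    simp only [pvPowMod_eq, ← hrem]
    split
    · rfl
    · apply ih
      rw [hrem, pow_succ, Int.mul_emod, Int.emod_emod_of_dvd _ (dvd_refl _), ← Int.mul_emod]

-- ===== VERDICT (by name: the statement is the Claim_ definition above) =====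
theorem find_loop_num_spec : Claim_equal_find_loop_num := by
  intro subj_num pub_num _
  unfold Spec_find_loop_num find_loop_num find_loop_num_alt
  exact (aux_eq subj_num pub_num 10000000 0 1 (by norm_num)).symm
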